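-- pv_equiv track=rewrite | github.com/Salamony4all/quque1 | utils/costing_engine.py | extract_table_blocks
-- ===== SOURCE A (Python) =====
-- def extract_table_blocks(markdown_text):
--     """
--     Extract table blocks from markdown text
--     """
--     lines = markdown_text.split('\n')
--     table_blocks = []
--     current_table = []
--     in_table = False
--
--     for line in lines:
--         if '|' in line:
--             in_table = True
--             current_table.append(line)
--         else:
--             if in_table and current_table:
--                 table_blocks.append('\n'.join(current_table))
--                 current_table = []
--             in_table = False
--
--     if current_table:
--         table_blocks.append('\n'.join(current_table))
--
--     return table_blocks
-- ===== SOURCE B (Python) =====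
-- def extract_table_blocks(markdown_text):
--     """
--     Extract table blocks from markdown text
--     """
--     blocks = []
--     lines = markdown_text.split('\n')
--     while lines:
--         if '|' in lines[0]:
--             run = []
--             while lines and '|' in lines[0]:
--                 run.append(lines[0])
--                 lines = lines[1:]
--             blocks.append('\n'.join(run))
--         else:
--             lines = lines[1:]
--     return blocks
-- ===== Notes on version B (the rewrite author's own statement) =====
-- stated objective: simpler
-- what changed: Replaces the in_table flag plus end-of-loop flush with a run-scanning loop that consumes each maximal consecutive run of pipe-containing lines and emits it directly, so no leftover state needs flushing after the loop.
import Mathlib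
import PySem

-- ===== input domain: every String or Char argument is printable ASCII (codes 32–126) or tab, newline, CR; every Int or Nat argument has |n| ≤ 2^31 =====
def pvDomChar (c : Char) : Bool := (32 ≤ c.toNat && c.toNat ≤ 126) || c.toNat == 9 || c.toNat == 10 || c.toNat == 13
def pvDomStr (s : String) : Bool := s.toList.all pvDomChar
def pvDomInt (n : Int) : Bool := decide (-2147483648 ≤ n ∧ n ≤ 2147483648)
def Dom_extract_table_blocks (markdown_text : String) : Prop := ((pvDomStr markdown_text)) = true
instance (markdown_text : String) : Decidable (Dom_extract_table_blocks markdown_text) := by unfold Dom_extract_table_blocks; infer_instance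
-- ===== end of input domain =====

-- B replaces A's in_table flag and end-of-loop flush by a run-scanning loop that emits each
-- maximal consecutive run of pipe-containing lines directly (objective: simpler; same cost).

-- ===== PORT A =====
-- '|' in line
def pvPipe (l : List Char) : Bool := PySem.Chars.isIn ['|'] l

-- the for-loop over lines with state (table_blocks, current_table, in_table), then the final flush
def pvAGo : List (List Char) → List (List Char) → List (List Char) → Bool → List (List Char)
  | [], blocks, cur, _ => blocks ++ (if cur = [] then [] else [PySem.Chars.join ['\n'] cur])
  | l :: ls, blocks, cur, intab =>
    if pvPipe l then pvAGo ls blocks (cur ++ [l]) true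
    else if intab ∧ cur ≠ [] then pvAGo ls (blocks ++ [PySem.Chars.join ['\n'] cur]) [] false
    else pvAGo ls blocks cur false

def extract_table_blocks (markdown_text : String) : List String :=
  (pvAGo (PySem.Chars.splitOn markdown_text.toList ['\n']) [] [] false).map String.mk

-- ===== PORT B =====
-- the outer while loop of Source B: consume a maximal run of pipe lines, emit it, recurse on the rest
def pvBGo : List (List Char) → List (List Char)
  | [] => []
  | l :: ls =>
    if pvPipe l then
      PySem.Chars.join ['\n'] (l :: ls.takeWhile pvPipe) :: pvBGo (ls.dropWhile pvPipe)
    else pvBGo ls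
  termination_by ls => ls.length
  decreasing_by
  · exact Nat.lt_succ_of_le (List.length_dropWhile_le pvPipe ls)
  · simp

def extract_table_blocks_alt (markdown_text : String) : List String :=
  (pvBGo (PySem.Chars.splitOn markdown_text.toList ['\n'])).map String.mk

-- ===== PRECONDITION & SPEC =====
def Spec_extract_table_blocks (markdown_text : String) (out : List String) : Prop := out = extract_table_blocks_alt markdown_text
instance (markdown_text : String) (out : List String) : Decidable (Spec_extract_table_blocks markdown_text out) := by unfold Spec_extract_table_blocks; infer_instance

-- ===== CLAIM (what is proved, stated in full; the proofs are below) =====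
def Claim_equal_extract_table_blocks : Prop := ∀ (markdown_text : String), Dom_extract_table_blocks markdown_text → Spec_extract_table_blocks markdown_text (extract_table_blocks markdown_text)

-- ===== LEMMAS AND PROOFS =====

-- A's loop from the reachable states equals B's run-scanning recursion:
-- from the idle state (cur = [], in_table = false) it appends exactly pvBGo;
-- from inside a run (cur ≠ [], in_table = true) it finishes the run then continues like pvBGo.
theorem pvGo_eq (ls : List (List Char)) :
    (∀ blocks, pvAGo ls blocks [] false = blocks ++ pvBGo ls) ∧
    (∀ blocks cur, cur ≠ [] →
      pvAGo ls blocks cur true =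
        blocks ++ (PySem.Chars.join ['\n'] (cur ++ ls.takeWhile pvPipe)
          :: pvBGo (ls.dropWhile pvPipe))) := by
  induction ls with
  | nil =>
    refine ⟨fun blocks => by simp [pvAGo, pvBGo], fun blocks cur hcur => ?_⟩
    simp [pvAGo, pvBGo, hcur]
  | cons l ls ih =>
    obtain ⟨ihP, ihQ⟩ := ih
    constructor
    · intro blocks
      by_cases hp : pvPipe l
      · rw [show pvAGo (l :: ls) blocks [] false = pvAGo ls blocks [l] true by
            simp [pvAGo, hp]]
        rw [ihQ blocks [l] (by simp)]
        simp [pvBGo, hp]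
      · rw [show pvAGo (l :: ls) blocks [] false = pvAGo ls blocks [] false by
            simp [pvAGo, hp]]
        rw [ihP blocks]
        simp [pvBGo, hp]
    · intro blocks cur hcur
      by_cases hp : pvPipe l
      · rw [show pvAGo (l :: ls) blocks cur true = pvAGo ls blocks (cur ++ [l]) true by
            simp [pvAGo, hp]]
        rw [ihQ blocks (cur ++ [l]) (by simp)]
        simp [hp]
      · rw [show pvAGo (l :: ls) blocks cur true
            = pvAGo ls (blocks ++ [PySem.Chars.join ['\n'] cur]) [] false by
            simp [pvAGo, hp, hcur]]
        rw [ihP]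
        simp [pvBGo, hp]

-- ===== VERDICT (by name: the statement is the Claim_ definition above) =====
theorem extract_table_blocks_spec : Claim_equal_extract_table_blocks := by
  intro s _
  unfold Spec_extract_table_blocks extract_table_blocks extract_table_blocks_alt
  rw [(pvGo_eq _).1 []]
  simp
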